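-- pv_equiv track=rewrite | github.com/Awiomanik/Advent_of_Code_WKK | Solutions/2023/Day09/EVENT.py | recursive_diff
-- ===== SOURCE A (Python) =====
-- def diff(seq):
--     return [seq[i] - seq[i-1] for i in range(1, len(seq))]
--
-- def recursive_diff(seq, list_of_sequences=None, extrapolating_back=False):
--     # set initial list
--     if list_of_sequences == None:
--         list_of_sequences = []
--
--     # recursion escape condition
--     if not any(seq):
--         return list_of_sequences
--
--     # add current value to return list
--     if extrapolating_back:
--         element2return = seq[0]
--     else:
--         element2return = seq[-1]
--     list_of_sequences.append(element2return)
--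
--     # recursive diff
--     seq = diff(seq)
--     recursive_diff(seq, list_of_sequences, extrapolating_back)
--
--     return list_of_sequences
-- ===== SOURCE B (Python) =====
-- def recursive_diff(seq, list_of_sequences=None, extrapolating_back=False):
--     # Phase 1: build the finite-difference table (rows with any nonzero entry).
--     rows = []
--     while any(seq):
--         rows.append(seq)
--         seq = [b - a for a, b in zip(seq, seq[1:])]
--     # Phase 2: extract the boundary element of each row in one pass.
--     out = list_of_sequences if list_of_sequences is not None else []
--     out += [row[0] if extrapolating_back else row[-1] for row in rows]
--     return out
-- ===== Notes on version B (the rewrite author's own statement) =====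
-- stated objective: simpler
-- what changed: Replaces the self-recursive accumulator mutation with a two-phase iterative version: a loop that materialises the difference-table rows, then a single comprehension extracting the boundary element of each row.
import Mathlib
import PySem

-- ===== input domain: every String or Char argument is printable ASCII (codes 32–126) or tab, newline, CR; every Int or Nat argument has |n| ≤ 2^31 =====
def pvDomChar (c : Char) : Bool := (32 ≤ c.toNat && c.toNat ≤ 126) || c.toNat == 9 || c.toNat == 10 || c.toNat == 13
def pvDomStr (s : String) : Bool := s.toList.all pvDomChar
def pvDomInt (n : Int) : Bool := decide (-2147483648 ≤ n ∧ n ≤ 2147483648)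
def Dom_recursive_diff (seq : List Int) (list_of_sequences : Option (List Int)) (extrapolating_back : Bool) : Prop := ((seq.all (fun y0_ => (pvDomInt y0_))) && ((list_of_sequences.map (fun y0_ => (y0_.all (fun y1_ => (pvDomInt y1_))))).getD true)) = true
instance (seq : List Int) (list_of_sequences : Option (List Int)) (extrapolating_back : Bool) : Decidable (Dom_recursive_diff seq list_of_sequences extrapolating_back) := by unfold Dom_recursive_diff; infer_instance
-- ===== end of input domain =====

-- ===== PORT A =====
-- B replaces the self-recursion with a two-phase iterative version (simpler); the
-- equivalence proved is about the RETURN value only — both Pythons also append the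
-- same elements in place to a caller-supplied list_of_sequences.

-- diff(seq) = [seq[i] - seq[i-1] for i in range(1, len(seq))]
def diffA (seq : List Int) : List Int :=
  (PySem.List.pyRange 1 (seq.length : Int) 1).map
    (fun i => PySem.List.pyGetD seq i 0 - PySem.List.pyGetD seq (i - 1) 0)

theorem diffA_length_lt (seq : List Int) (h : seq ≠ []) : (diffA seq).length < seq.length := by
  have : seq.length ≠ 0 := by simpa using List.length_eq_zero_iff.not.mpr h
  simp [diffA, PySem.List.pyRange_of_pos (a := 1) (b := (seq.length : Int)) (s := 1) one_pos]
  split_ifs <;> omega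

-- the recursive body after the default-argument substitution
def recursive_diffA (seq : List Int) (acc : List Int) (extrapolating_back : Bool) : List Int :=
  if ¬ seq.any (fun x => x ≠ 0) then acc
  else
    let element2return : Int :=
      if extrapolating_back then PySem.List.pyGetD seq 0 0
      else PySem.List.pyGetD seq (-1) 0
    recursive_diffA (diffA seq) (acc ++ [element2return]) extrapolating_back
termination_by seq.length
decreasing_by
  exact diffA_length_lt seq (by rintro rfl; simp at *)

def recursive_diff (seq : List Int) (list_of_sequences : Option (List Int)) (extrapolating_back : Bool) : List Int :=
  recursive_diffA seq (list_of_sequences.getD []) extrapolating_back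

-- ===== PORT B =====
-- [b - a for a, b in zip(seq, seq[1:])]
def diffB (seq : List Int) : List Int :=
  (seq.zip (PySem.List.slice seq (some 1) none)).map (fun p => p.2 - p.1)

theorem diffB_length_lt (seq : List Int) (h : seq ≠ []) : (diffB seq).length < seq.length := by
  have : seq.length ≠ 0 := by simpa using List.length_eq_zero_iff.not.mpr h
  simp [diffB, PySem.List.slice_from_one]
  omega

-- Phase 1: the list of difference-table rows
def rowsB (seq : List Int) : List (List Int) :=
  if seq.any (fun x => x ≠ 0) then seq :: rowsB (diffB seq) else []
termination_by seq.length
decreasing_by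
  exact diffB_length_lt seq (by rintro rfl; simp_all)

def recursive_diff_alt (seq : List Int) (list_of_sequences : Option (List Int)) (extrapolating_back : Bool) : List Int :=
  list_of_sequences.getD [] ++
    (rowsB seq).map (fun row =>
      if extrapolating_back then PySem.List.pyGetD row 0 0 else PySem.List.pyGetD row (-1) 0)

-- ===== PRECONDITION & SPEC =====
def Spec_recursive_diff (seq : List Int) (list_of_sequences : Option (List Int)) (extrapolating_back : Bool) (out : List Int) : Prop := out = recursive_diff_alt seq list_of_sequences extrapolating_back
instance (seq : List Int) (list_of_sequences : Option (List Int)) (extrapolating_back : Bool) (out : List Int) : Decidable (Spec_recursive_diff seq list_of_sequences extrapolating_back out) := by unfold Spec_recursive_diff; infer_instance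

-- ===== CLAIM (what is proved, stated in full; the proofs are below) =====
def Claim_equal_recursive_diff : Prop := ∀ (seq : List Int) (list_of_sequences : Option (List Int)) (extrapolating_back : Bool), Dom_recursive_diff seq list_of_sequences extrapolating_back → Spec_recursive_diff seq list_of_sequences extrapolating_back (recursive_diff seq list_of_sequences extrapolating_back)

-- ===== LEMMAS AND PROOFS =====

theorem diffA_eq_diffB (seq : List Int) : diffA seq = diffB seq := by
  apply List.ext_getElem
  · simp [diffA, diffB, PySem.List.pyRange_of_pos (a := 1) (b := (seq.length : Int)) one_pos,
      PySem.List.slice_from_one]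
    all_goals omega
  · intro k h1 h2
    have hk : k + 1 < seq.length := by
      simp [diffA, PySem.List.pyRange_of_pos (a := 1) (b := (seq.length : Int)) one_pos] at h1
      split_ifs at h1 <;> omega
    have e1 : (1 : Int) + 1 * (k : Int) = ((k + 1 : Nat) : Int) := by push_cast; ring
    simp only [diffA, diffB, PySem.List.pyRange_of_pos (a := 1) (b := (seq.length : Int)) one_pos,
      PySem.List.slice_from_one, List.getElem_map, List.getElem_range, List.getElem_zip, e1]
    rw [show ((k + 1 : Nat) : Int) - 1 = ((k : Nat) : Int) by push_cast; ring]
    simp only [PySem.List.pyGetD_natCast]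
    rw [List.getD_eq_getElem _ _ hk, List.getD_eq_getElem _ _ (by omega), List.getElem_tail]

theorem recursive_diffA_eq (seq acc : List Int) (back : Bool) :
    recursive_diffA seq acc back =
      acc ++ (rowsB seq).map (fun row =>
        if back then PySem.List.pyGetD row 0 0 else PySem.List.pyGetD row (-1) 0) := by
  fun_induction recursive_diffA seq acc back with
  | case1 seq acc hall =>
    rw [rowsB, if_neg (by simpa using hall)]
    simp
  | case2 seq acc hany e ih =>
    rw [ih, show rowsB seq = seq :: rowsB (diffB seq) from by
      rw [rowsB, if_pos (by simpa using hany)], ← diffA_eq_diffB]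
    cases back <;> simp [e]

-- ===== VERDICT (by name: the statement is the Claim_ definition above) =====
theorem recursive_diff_spec : Claim_equal_recursive_diff := by
  intro seq los back _
  unfold Spec_recursive_diff recursive_diff recursive_diff_alt
  exact recursive_diffA_eq seq (los.getD []) back
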